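-- pv_equiv track=rewrite | github.com/jibb34/MScProject | code/pipeline/source/show_enriched.py | nth_non_null_index
-- ===== SOURCE A (Python) =====
-- from typing import Any, Dict, Iterable, List, Optional, Sequence, Tuple
--
-- def nth_non_null_index(items: Sequence[Optional[Dict[str, Any]]], n: int) -> Optional[int]:
--     """Return the absolute index of the n-th non-null element (0-based).
--     If not found, return None.
--     """
--     count = 0
--     for i, x in enumerate(items):
--         if x is not None:
--             if count == n:
--                 return i
--             count += 1
--     return None
-- ===== SOURCE B (Python) =====
-- def nth_non_null_index(items, n):
--     """Return the absolute index of the n-th non-null element (0-based).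
--     If not found, return None.
--     """
--     idxs = [i for i, x in enumerate(items) if x is not None]
--     return idxs[n] if 0 <= n < len(idxs) else None
-- ===== Notes on version B (the rewrite author's own statement) =====
-- stated objective: alternative
-- what changed: replaces the early-exit scan with a counter by a two-phase compute: materialize the list of non-null indices, then do a bounds-checked lookup (guarding negative n explicitly)
import Mathlib
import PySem

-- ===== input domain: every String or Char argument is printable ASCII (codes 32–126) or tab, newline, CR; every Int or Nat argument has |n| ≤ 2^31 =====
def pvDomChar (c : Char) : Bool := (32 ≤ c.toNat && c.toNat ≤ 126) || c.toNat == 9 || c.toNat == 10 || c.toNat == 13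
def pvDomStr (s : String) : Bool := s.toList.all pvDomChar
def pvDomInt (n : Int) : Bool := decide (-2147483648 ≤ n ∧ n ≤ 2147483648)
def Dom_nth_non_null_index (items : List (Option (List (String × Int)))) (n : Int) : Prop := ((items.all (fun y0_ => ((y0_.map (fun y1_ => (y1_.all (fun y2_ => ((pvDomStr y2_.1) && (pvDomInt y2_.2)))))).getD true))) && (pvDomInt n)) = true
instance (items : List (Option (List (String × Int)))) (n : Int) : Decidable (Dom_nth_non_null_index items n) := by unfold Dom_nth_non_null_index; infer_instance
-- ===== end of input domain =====

-- ===== PORT A =====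
-- A: single scan with a counter, early return on the n-th non-null element
def pvGoA (items : List (Option (List (String × Int)))) (i : Int) (count : Int) (n : Int) : Option Int :=
  match items with
  | [] => none
  | x :: rest =>
    match x with
    | some _ => if count = n then some i else pvGoA rest (i + 1) (count + 1) n
    | none => pvGoA rest (i + 1) count n

def nth_non_null_index (items : List (Option (List (String × Int)))) (n : Int) : Option Int :=
  pvGoA items 0 0 n

-- ===== PORT B =====
-- B: materialize the index table of non-null elements, then a bounds-checked lookup
def nth_non_null_index_alt (items : List (Option (List (String × Int)))) (n : Int) : Option Int :=
  let idxs : List Int := (items.zipIdx).filterMap (fun p => if p.1.isSome then some ((p.2 : Nat) : Int) else none)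
  if 0 ≤ n ∧ n < (idxs.length : Int) then idxs[n.toNat]? else none

-- ===== PRECONDITION & SPEC =====
def Spec_nth_non_null_index (items : List (Option (List (String × Int)))) (n : Int) (out : Option Int) : Prop := out = nth_non_null_index_alt items n
instance (items : List (Option (List (String × Int)))) (n : Int) (out : Option Int) : Decidable (Spec_nth_non_null_index items n out) := by unfold Spec_nth_non_null_index; infer_instance

-- ===== CLAIM (what is proved, stated in full; the proofs are below) =====
def Claim_equal_nth_non_null_index : Prop := ∀ (items : List (Option (List (String × Int)))) (n : Int), Dom_nth_non_null_index items n → Spec_nth_non_null_index items n (nth_non_null_index items n)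

-- ===== LEMMAS AND PROOFS =====
-- index table of non-null elements, starting at absolute index i
def pvIdxs (items : List (Option (List (String × Int)))) (i : Int) : List Int :=
  match items with
  | [] => []
  | x :: rest =>
    match x with
    | some _ => i :: pvIdxs rest (i + 1)
    | none => pvIdxs rest (i + 1)

def pvLookup (l : List Int) (k : Int) : Option Int :=
  if 0 ≤ k ∧ k < (l.length : Int) then l[k.toNat]? else none

theorem pvLookup_cons (a : Int) (l : List Int) (k : Int) (h : k ≠ 0) :
    pvLookup (a :: l) k = pvLookup l (k - 1) := by
  unfold pvLookup
  rcases lt_or_gt_of_ne h with hlt | hgt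
  · rw [if_neg (by omega), if_neg (by omega)]
  · simp only [List.length_cons]
    by_cases hk : k - 1 < (l.length : Int)
    · rw [if_pos ⟨by omega, by push_cast; omega⟩, if_pos ⟨by omega, hk⟩]
      have hkn : k.toNat = (k - 1).toNat + 1 := by omega
      rw [hkn, List.getElem?_cons_succ]
    · rw [if_neg (by push_cast; omega), if_neg (by omega)]

theorem pvGoA_eq (items : List (Option (List (String × Int)))) :
    ∀ (i count n : Int), pvGoA items i count n = pvLookup (pvIdxs items i) (n - count) := by
  induction items with
  | nil => intro i count n; simp [pvGoA, pvIdxs, pvLookup]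
  | cons x rest ih =>
    intro i count n
    cases x with
    | none => simpa [pvGoA, pvIdxs] using ih (i + 1) count n
    | some v =>
      simp only [pvGoA, pvIdxs]
      by_cases h : count = n
      · subst h
        simp [pvLookup]
      · rw [if_neg h, ih (i + 1) (count + 1) n, pvLookup_cons _ _ _ (by omega)]
        congr 1; omega

theorem pvIdxs_eq_zipIdx (items : List (Option (List (String × Int)))) :
    ∀ (k : Nat),
      (items.zipIdx k).filterMap (fun p => if p.1.isSome then some ((p.2 : Nat) : Int) else none)
        = pvIdxs items (k : Int) := by
  induction items with
  | nil => intro k; simp [pvIdxs]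
  | cons x rest ih =>
    intro k
    have hrec := ih (k + 1)
    push_cast at hrec
    cases x with
    | none =>
      rw [List.zipIdx_cons, List.filterMap_cons]
      simpa [pvIdxs] using hrec
    | some v =>
      rw [List.zipIdx_cons, List.filterMap_cons]
      simpa [pvIdxs] using hrec

-- ===== VERDICT (by name: the statement is the Claim_ definition above) =====
theorem nth_non_null_index_spec : Claim_equal_nth_non_null_index := by
  intro items n _
  unfold Spec_nth_non_null_index nth_non_null_index nth_non_null_index_alt
  rw [pvGoA_eq items 0 0 n]
  have h0 := pvIdxs_eq_zipIdx items 0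
  simp only [Nat.cast_zero] at h0
  rw [show (items.zipIdx) = items.zipIdx 0 from rfl, h0]
  simp [pvLookup]
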